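-- pv_equiv track=rewrite | github.com/CAVELAB-HK/Learning | Week1_2_URL_shortener/base_62.py | base_62_encoder
-- ===== SOURCE A (Python) =====
-- base_62_list = "0123456789abcdefghijklmnopqrstuvwxyzABCDEFGHIJKLMNOPQRSTUVWXYZ"
--
-- def base_62_encoder(number):
--     if number == 0:
--         return number
--
--     result = []
--     while number > 0:
--         remainder = base_62_list[number % 62]
--         result.append(str(remainder))
--         number = number // 62
--
--     result_inverse = result[len(result): : -1]
--     return "".join(result_inverse)
-- ===== SOURCE B (Python) =====
-- base_62_list = "0123456789abcdefghijklmnopqrstuvwxyzABCDEFGHIJKLMNOPQRSTUVWXYZ"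
--
-- def _enc(n):
--     if n <= 0:
--         return ""
--     return _enc(n // 62) + base_62_list[n % 62]
--
-- def base_62_encoder(number):
--     if number == 0:
--         return number
--     return _enc(number)
-- ===== Notes on version B (the rewrite author's own statement) =====
-- stated objective: alternative
-- what changed: Replaces the append-then-reverse while loop with a recursive helper that builds the string most-significant-digit-first by recursing on the quotient, so the explicit digit list, the final slice-reversal and the join disappear.
-- outside the precondition, e.g. on base_62_encoder(0): A returns 0, B returns 0
import Mathlib
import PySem

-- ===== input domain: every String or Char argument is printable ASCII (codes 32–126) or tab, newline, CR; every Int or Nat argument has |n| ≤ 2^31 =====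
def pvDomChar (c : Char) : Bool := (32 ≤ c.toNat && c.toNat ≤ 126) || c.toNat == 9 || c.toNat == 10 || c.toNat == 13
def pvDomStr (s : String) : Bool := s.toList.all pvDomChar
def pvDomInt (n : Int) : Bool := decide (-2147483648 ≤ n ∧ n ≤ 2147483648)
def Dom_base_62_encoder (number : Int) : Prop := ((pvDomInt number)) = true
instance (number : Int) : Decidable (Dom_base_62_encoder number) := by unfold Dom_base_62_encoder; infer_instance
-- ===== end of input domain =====

-- B replaces A's append-then-reverse digit loop with a recursive helper building the string
-- most-significant-digit-first; equal on all nonzero inputs (number = 0, where Python returns the int 0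
-- rather than a string, is excluded by Pre_).


-- ===== PORT A =====
-- base_62_list (as a list of characters; Python string indexing yields one-character strings,
-- kept here as singleton `List Char` entries of the result list)
def base62Chars : List Char :=
  "0123456789abcdefghijklmnopqrstuvwxyzABCDEFGHIJKLMNOPQRSTUVWXYZ".toList

-- the while loop: append base_62_list[number % 62] (a 1-char string), number //= 62.
-- number % 62 is always in range (62 > 0), so pyGetD is exact here (no IndexError possible).
def b62LoopA (number : Int) (result : List (List Char)) : List (List Char) :=
  if _h : number > 0 then
    b62LoopA (PySem.Int.floordiv number 62)
      (result ++ [[PySem.List.pyGetD base62Chars (PySem.Int.mod number 62) ' ']])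
  else result
termination_by number.toNat
decreasing_by
  have h2 : PySem.Int.floordiv number 62 = number / 62 :=
    PySem.Int.floordiv_eq_ediv_of_pos (by omega)
  rw [h2]; omega

def base_62_encoder (number : Int) : String :=
  if number == 0 then ""   -- Python returns the int 0 here (not a string); excluded by Pre_
  else
    let result := b62LoopA number []
    -- result[len(result): : -1] then "".join(...); step = -1 ≠ 0, so slice? is always `some`
    let resultInverse :=
      (PySem.List.slice? result (some (result.length : Int)) none (-1)).getD []
    String.ofList (PySem.Chars.join [] resultInverse)

-- ===== PORT B =====
-- _enc: "" for n <= 0, else _enc(n // 62) + base_62_list[n % 62]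
def b62Enc (n : Int) : List Char :=
  if _h : n ≤ 0 then []
  else b62Enc (PySem.Int.floordiv n 62) ++ [PySem.List.pyGetD base62Chars (PySem.Int.mod n 62) ' ']
termination_by n.toNat
decreasing_by
  have h2 : PySem.Int.floordiv n 62 = n / 62 :=
    PySem.Int.floordiv_eq_ediv_of_pos (by omega)
  rw [h2]; omega

def base_62_encoder_alt (number : Int) : String :=
  if number == 0 then ""   -- Python returns the int 0 here (not a string); excluded by Pre_
  else String.ofList (b62Enc number)

-- ===== PRECONDITION & SPEC =====
-- Pre_ excludes number = 0, where the Python A (and B) returns the int 0, not a value of the declared String type.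
def Pre_base_62_encoder (number : Int) : Prop := number ≠ 0
instance (number : Int) : Decidable (Pre_base_62_encoder number) := by unfold Pre_base_62_encoder; infer_instance
def pvWitness_base_62_encoder : Int := (12345)

def Spec_base_62_encoder (number : Int) (out : String) : Prop := out = base_62_encoder_alt number
instance (number : Int) (out : String) : Decidable (Spec_base_62_encoder number out) := by unfold Spec_base_62_encoder; infer_instance

-- ===== CLAIM (what is proved, stated in full; the proofs are below) =====
def Claim_equal_base_62_encoder : Prop := ∀ (number : Int), Dom_base_62_encoder number → Pre_base_62_encoder number → Spec_base_62_encoder number (base_62_encoder number)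

-- ===== LEMMAS AND PROOFS =====

-- unfolding equations for the two recursions
theorem b62LoopA_pos (n : Int) (acc : List (List Char)) (h : n > 0) :
    b62LoopA n acc = b62LoopA (PySem.Int.floordiv n 62)
      (acc ++ [[PySem.List.pyGetD base62Chars (PySem.Int.mod n 62) ' ']]) := by
  rw [b62LoopA]; exact dif_pos h

theorem b62LoopA_neg (n : Int) (acc : List (List Char)) (h : ¬ n > 0) :
    b62LoopA n acc = acc := by
  rw [b62LoopA]; exact dif_neg h

theorem b62Enc_pos (n : Int) (h : ¬ n ≤ 0) :
    b62Enc n = b62Enc (PySem.Int.floordiv n 62)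
      ++ [PySem.List.pyGetD base62Chars (PySem.Int.mod n 62) ' '] := by
  rw [b62Enc]; exact dif_neg h

theorem b62Enc_neg (n : Int) (h : n ≤ 0) : b62Enc n = [] := by
  rw [b62Enc]; exact dif_pos h

-- "".join with empty separator is flatten
theorem joinNil_eq_flatten (xss : List (List Char)) : PySem.Chars.join [] xss = xss.flatten := by
  simp only [PySem.Chars.join, List.intercalate]
  induction xss with
  | nil => simp
  | cons x xs ih => cases xs <;> simp_all [List.intersperse]

-- the accumulator of A's loop is a pure prefix
theorem b62LoopA_acc (number : Int) (acc : List (List Char)) :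
    b62LoopA number acc = acc ++ b62LoopA number [] := by
  induction number using b62Enc.induct generalizing acc with
  | case1 n h =>
      rw [b62LoopA_neg n acc (by omega), b62LoopA_neg n [] (by omega)]
      simp
  | case2 n h ih =>
      rw [b62LoopA_pos n acc (by omega), b62LoopA_pos n [] (by omega)]
      rw [ih, ih ([] ++ _)]
      simp

-- the joined reversed digit list of A's loop is exactly B's recursion
theorem join_reverse_loopA (n : Int) :
    PySem.Chars.join [] (b62LoopA n []).reverse = b62Enc n := by
  induction n using b62Enc.induct with
  | case1 n h =>
      rw [b62LoopA_neg n [] (by omega), b62Enc_neg n h]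
      simp
  | case2 n h ih =>
      rw [b62LoopA_pos n [] (by omega), b62Enc_pos n h, b62LoopA_acc]
      simp only [joinNil_eq_flatten, List.nil_append, List.reverse_append, List.reverse_cons,
        List.reverse_nil, List.nil_append, List.flatten_append, List.flatten_cons,
        List.flatten_nil, List.append_nil]
      rw [← joinNil_eq_flatten, ih]

-- slicing result[len(result): : -1] with step -1 is the full reverse
theorem slice_len_eq_rev {α : Type} (xs : List α) :
    PySem.List.slice? xs (some (xs.length : Int)) none (-1) = some xs.reverse := by
  rw [← PySem.List.slice?_none_none_neg_one]
  simp [PySem.List.slice?, PySem.List.sliceIndices, show ¬((xs.length : Int) < 0) by omega]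

-- ===== VERDICT (by name: the statement is the Claim_ definition above) =====
theorem base_62_encoder_spec : Claim_equal_base_62_encoder := by
  intro n _ hp
  have hn : n ≠ 0 := hp
  have hne : (n == 0) = false := by simp [hn]
  unfold Spec_base_62_encoder base_62_encoder base_62_encoder_alt
  simp only [hne, Bool.false_eq_true, if_false]
  rw [slice_len_eq_rev, Option.getD_some, join_reverse_loopA]
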